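-- pv_equiv track=rewrite | github.com/Haris-Mughal/Advent_of_code-2024 | day_14/day_14_p2.py | is_christmas_tree
-- ===== SOURCE A (Python) =====
-- from typing import List, Tuple, Set
--
-- def is_christmas_tree(positions: Set[Tuple[int, int]]) -> bool:
--     """
--     Check if the robot positions form a Christmas tree pattern.
--
--     Args:
--         positions (Set): Set of robot positions
--
--     Returns:
--         Boolean indicating if a Christmas tree pattern is found
--     """
--     # Define the Christmas tree pattern as relative positions
--     tree_pattern = [
--         (0, 2), (1, 1), (2, 0), (2, 1), (2, 2), (2, 3), (2, 4), (3, 2),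
--         (4, 1), (4, 2), (4, 3)
--     ]
--
--     for x, y in positions:
--         if all((x + dx, y + dy) in positions for dx, dy in tree_pattern):
--             return True
--     return False
-- ===== SOURCE B (Python) =====
-- def is_christmas_tree(positions):
--     """Vote-counting: every robot casts one vote for each anchor cell that would
--     need it; an anchor forming the tree is a robot cell with all 11 votes."""
--     tree_pattern = [
--         (0, 2), (1, 1), (2, 0), (2, 1), (2, 2), (2, 3), (2, 4), (3, 2),
--         (4, 1), (4, 2), (4, 3)
--     ]
--     pos = set(positions)
--     votes = {}
--     for x, y in pos:
--         for dx, dy in tree_pattern: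
--             key = (x - dx, y - dy)
--             votes[key] = votes.get(key, 0) + 1
--     return any(votes.get(p, 0) == len(tree_pattern) for p in pos)
-- ===== Notes on version B (the rewrite author's own statement) =====
-- stated objective: alternative
-- what changed: Replaced per-anchor pattern scanning (any/all membership tests) by a vote-counting pass: each robot increments a dict counter at every anchor cell it could support, then B checks whether some robot position collected all 11 votes.
import Mathlib
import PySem

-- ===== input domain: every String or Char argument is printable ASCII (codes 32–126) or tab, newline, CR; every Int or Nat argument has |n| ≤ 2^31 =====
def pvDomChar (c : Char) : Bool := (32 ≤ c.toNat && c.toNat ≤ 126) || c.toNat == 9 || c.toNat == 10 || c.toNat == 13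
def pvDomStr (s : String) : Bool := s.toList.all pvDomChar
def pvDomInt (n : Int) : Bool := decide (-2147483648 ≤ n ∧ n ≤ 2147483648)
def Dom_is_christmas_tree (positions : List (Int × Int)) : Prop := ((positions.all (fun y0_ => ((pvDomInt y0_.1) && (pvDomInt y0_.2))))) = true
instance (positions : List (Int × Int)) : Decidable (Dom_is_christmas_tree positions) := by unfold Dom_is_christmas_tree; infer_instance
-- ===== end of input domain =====

-- B replaces A's per-anchor pattern scan by a vote-counting dict pass
-- (objective: alternative decomposition, same asymptotic cost).

-- ===== PORT A =====
-- A-side helper: the fixed tree pattern of relative positions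
def treePatternA : List (Int × Int) :=
  [(0, 2), (1, 1), (2, 0), (2, 1), (2, 2), (2, 3), (2, 4), (3, 2),
   (4, 1), (4, 2), (4, 3)]

-- for x, y in positions: if all((x+dx, y+dy) in positions ...): return True / return False
def is_christmas_tree (positions : List (Int × Int)) : Bool :=
  positions.any (fun p =>
    treePatternA.all (fun d => positions.contains (p.1 + d.1, p.2 + d.2)))

-- ===== PORT B =====
-- B-side helper: the same fixed pattern constant
def treePatternB : List (Int × Int) :=
  [(0, 2), (1, 1), (2, 0), (2, 1), (2, 2), (2, 3), (2, 4), (3, 2),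
   (4, 1), (4, 2), (4, 3)]

-- for x, y in pos: for dx, dy in tree_pattern: votes[key] = votes.get(key, 0) + 1
def votesB (pos : List (Int × Int)) : PySem.Dict (Int × Int) Int :=
  pos.foldl
    (fun v q =>
      treePatternB.foldl (fun v d => v.modify (q.1 - d.1, q.2 - d.2) 0 (· + 1)) v)
    PySem.Dict.empty

-- pos = set(positions); build votes; any(votes.get(p, 0) == len(tree_pattern) for p in pos)
def is_christmas_tree_alt (positions : List (Int × Int)) : Bool :=
  (PySem.Set.ofList positions).any (fun p =>
    (votesB (PySem.Set.ofList positions)).getD p 0 == (treePatternB.length : Int))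

-- ===== PRECONDITION & SPEC =====
def Spec_is_christmas_tree (positions : List (Int × Int)) (out : Bool) : Prop := out = is_christmas_tree_alt positions
instance (positions : List (Int × Int)) (out : Bool) : Decidable (Spec_is_christmas_tree positions out) := by unfold Spec_is_christmas_tree; infer_instance

-- ===== CLAIM =====
def Claim_equal_is_christmas_tree : Prop := ∀ (positions : List (Int × Int)), Dom_is_christmas_tree positions → Spec_is_christmas_tree positions (is_christmas_tree positions)

-- ===== LEMMAS AND PROOFS =====

-- the nested vote loop is one modify-loop over the flatMap of all cast votes
theorem votesB_eq (pos : List (Int × Int)) :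
    votesB pos
      = (pos.flatMap (fun q => treePatternB.map (fun d => (q.1 - d.1, q.2 - d.2)))).foldl
          (fun v k => v.modify k 0 (· + 1)) PySem.Dict.empty := by
  rw [votesB, List.foldl_flatMap]
  simp [List.foldl_map]

theorem getD_votesB' (pos : List (Int × Int)) (p : Int × Int) :
    (votesB pos).getD p 0
      = ((pos.flatMap (fun q => treePatternB.map (fun d => (q.1 - d.1, q.2 - d.2)))).count p : Int) := by
  rw [votesB_eq, PySem.Dict.getD_foldl_modify_add_one]
  simp

-- one robot q contributes one vote to p iff its offset from p is in the pattern
theorem count_keys (q p : Int × Int) :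
    (treePatternB.map (fun d => (q.1 - d.1, q.2 - d.2))).count p
      = if (q.1 - p.1, q.2 - p.2) ∈ treePatternB then 1 else 0 := by
  have hinj : Function.Injective (fun d : Int × Int => (q.1 - d.1, q.2 - d.2)) := by
    intro a b h
    simp only [Prod.mk.injEq] at h
    exact Prod.ext (by omega) (by omega)
  have hp : p = (fun d : Int × Int => (q.1 - d.1, q.2 - d.2)) (q.1 - p.1, q.2 - p.2) := by
    simp
  conv_lhs => rw [hp, List.count_map_of_injective _ _ hinj]
  exact List.Nodup.count (l := treePatternB) (by decide)

-- summing the votes for p over all robots counts the robots at a pattern offset from p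
theorem count_flat (pos : List (Int × Int)) (p : Int × Int) :
    (pos.flatMap (fun q => treePatternB.map (fun d => (q.1 - d.1, q.2 - d.2)))).count p
      = pos.countP (fun q => decide ((q.1 - p.1, q.2 - p.2) ∈ treePatternB)) := by
  rw [List.count_flatMap]
  induction pos with
  | nil => rfl
  | cons q pos ih =>
    simp only [List.map_cons, List.sum_cons, List.countP_cons, Function.comp_apply, ih, count_keys]
    by_cases h : (q.1 - p.1, q.2 - p.2) ∈ treePatternB <;> simp [h] <;> try omega

-- change of variable q = p + d: counting robots at pattern offsets = counting occupied offsets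
theorem countP_shift (pos : List (Int × Int)) (hnd : pos.Nodup) (p : Int × Int) :
    pos.countP (fun q => decide ((q.1 - p.1, q.2 - p.2) ∈ treePatternB))
      = treePatternB.countP (fun d => decide ((p.1 + d.1, p.2 + d.2) ∈ pos)) := by
  rw [List.countP_eq_length_filter, List.countP_eq_length_filter]
  have hinj : Function.Injective (fun q : Int × Int => (q.1 - p.1, q.2 - p.2)) := by
    intro a b h
    simp only [Prod.mk.injEq] at h
    exact Prod.ext (by omega) (by omega)
  have hperm :
      ((pos.filter (fun q => decide ((q.1 - p.1, q.2 - p.2) ∈ treePatternB))).map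
          (fun q => (q.1 - p.1, q.2 - p.2))).Perm
        (treePatternB.filter (fun d => decide ((p.1 + d.1, p.2 + d.2) ∈ pos))) := by
    rw [List.perm_ext_iff_of_nodup
        (List.Nodup.map hinj (List.Nodup.filter _ hnd))
        (List.Nodup.filter _ (by decide))]
    intro y
    simp only [List.mem_map, List.mem_filter, decide_eq_true_eq]
    constructor
    · rintro ⟨q, ⟨hq, hmem⟩, rfl⟩
      refine ⟨hmem, ?_⟩
      have hqy : (p.1 + (q.1 - p.1), p.2 + (q.2 - p.2)) = q := Prod.ext (by omega) (by omega)
      rwa [hqy]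
    · rintro ⟨hy, hmem⟩
      refine ⟨(p.1 + y.1, p.2 + y.2), ⟨hmem, ?_⟩, ?_⟩
      · simpa using hy
      · exact Prod.ext (by omega) (by omega)
  have hlen := hperm.length_eq
  simpa using hlen

-- the vote total at p counts the pattern offsets whose shifted cell is occupied
theorem getD_votesB (positions : List (Int × Int)) (p : Int × Int) :
    (votesB (PySem.Set.ofList positions)).getD p 0
      = (treePatternB.countP
          (fun d => decide ((p.1 + d.1, p.2 + d.2) ∈ positions)) : Int) := by
  rw [getD_votesB', count_flat,
      countP_shift _ (PySem.Set.nodup_ofList (xs := positions)) p]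
  congr 1
  apply List.countP_congr
  intro d _
  simp [PySem.Set.mem_ofList]

-- "all 11 votes" at p is exactly A's all-offsets-occupied test
theorem anchor_iff (positions : List (Int × Int)) (p : Int × Int) :
    ((votesB (PySem.Set.ofList positions)).getD p 0 == (treePatternB.length : Int))
      = treePatternB.all (fun d => positions.contains (p.1 + d.1, p.2 + d.2)) := by
  rw [getD_votesB, Bool.eq_iff_iff]
  simp only [beq_iff_eq, Int.natCast_inj, List.all_eq_true, List.contains_iff_mem]
  rw [List.countP_eq_length]
  simp

-- ===== VERDICT =====
theorem is_christmas_tree_spec : Claim_equal_is_christmas_tree := by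
  intro positions _
  unfold Spec_is_christmas_tree is_christmas_tree is_christmas_tree_alt
  simp only [anchor_iff]
  rw [Bool.eq_iff_iff]
  simp only [List.any_eq_true, PySem.Set.mem_ofList, treePatternA, treePatternB]
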